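-- pv_equiv track=rewrite | github.com/marcr2/Cybernetic-Planning-Experiment | src/cybernetic_planning/data/hierarchical_sector_mapper.py | _assess_technology_level
-- ===== SOURCE A (Python) =====
-- def _assess_technology_level(sector_name: str) -> str:
--     """Assess the technology level of a sector."""
--     advanced_terms = ["ai", "quantum", "nano", "biotech", "semiconductor", "aerospace"]
--     if any(term in sector_name for term in advanced_terms):
--         return "advanced"
--     elif any(term in sector_name for term in ["tech", "digital", "software", "renewable"]):
--         return "high"
--     else:
--         return "moderate"
-- ===== SOURCE B (Python) =====
-- def _assess_technology_level(sector_name: str) -> str: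
--     """Assess the technology level of a sector."""
--     scores = {
--         "ai": 2, "quantum": 2, "nano": 2, "biotech": 2,
--         "semiconductor": 2, "aerospace": 2,
--         "tech": 1, "digital": 1, "software": 1, "renewable": 1,
--     }
--     level = 0
--     for keyword, score in scores.items():
--         if keyword in sector_name and score > level:
--             level = score
--     return ["moderate", "high", "advanced"][level]
-- ===== Notes on version B (the rewrite author's own statement) =====
-- stated objective: alternative
-- what changed: Replaces A's priority-ordered early-exit any() scans with an aggregation: each keyword carries a numeric tier score, one fold computes the maximum score over all matching keywords, and the label is decoded from that score.
import Mathlib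
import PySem

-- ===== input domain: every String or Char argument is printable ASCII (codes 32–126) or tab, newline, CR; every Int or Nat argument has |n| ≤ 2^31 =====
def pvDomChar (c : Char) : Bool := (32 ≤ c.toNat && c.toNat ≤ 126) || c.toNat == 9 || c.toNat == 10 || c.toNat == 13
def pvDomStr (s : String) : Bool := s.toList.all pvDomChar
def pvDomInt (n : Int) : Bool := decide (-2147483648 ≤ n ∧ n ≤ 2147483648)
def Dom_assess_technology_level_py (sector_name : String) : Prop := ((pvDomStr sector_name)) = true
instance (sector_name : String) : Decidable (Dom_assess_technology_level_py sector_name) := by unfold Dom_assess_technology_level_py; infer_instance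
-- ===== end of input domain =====

-- B replaces A's priority-ordered early-exit any() scans with an aggregation: each keyword has a
-- numeric tier score, one fold takes the maximum score over all matching keywords, and the label
-- is decoded from that score (alternative decomposition; same cost).

-- ===== PORT A =====
def assess_technology_level_py (sector_name : String) : String :=
  let advanced_terms : List String := ["ai", "quantum", "nano", "biotech", "semiconductor", "aerospace"]
  if advanced_terms.any (fun term => PySem.Str.isIn term sector_name) then "advanced"
  else if (["tech", "digital", "software", "renewable"] : List String).any (fun term => PySem.Str.isIn term sector_name) then "high"
  else "moderate"

-- ===== PORT B =====
def pvScores : List (String × Int) :=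
  [("ai", 2), ("quantum", 2), ("nano", 2), ("biotech", 2),
   ("semiconductor", 2), ("aerospace", 2),
   ("tech", 1), ("digital", 1), ("software", 1), ("renewable", 1)]

def assess_technology_level_py_alt (sector_name : String) : String :=
  let level : Int := pvScores.foldl
    (fun level kv =>
      if PySem.Str.isIn kv.1 sector_name && kv.2 > level then kv.2 else level) 0
  ((PySem.List.pyGet? (["moderate", "high", "advanced"] : List String) level).getD "")

-- ===== PRECONDITION & SPEC =====
def Spec_assess_technology_level_py (sector_name : String) (out : String) : Prop := out = assess_technology_level_py_alt sector_name
instance (sector_name : String) (out : String) : Decidable (Spec_assess_technology_level_py sector_name out) := by unfold Spec_assess_technology_level_py; infer_instance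

-- ===== CLAIM (what is proved, stated in full; the proofs are below) =====
def Claim_equal_assess_technology_level_py : Prop := ∀ (sector_name : String), Dom_assess_technology_level_py sector_name → Spec_assess_technology_level_py sector_name (assess_technology_level_py sector_name)

-- ===== LEMMAS AND PROOFS =====

-- The whole comparison with the ten substring tests abstracted as Booleans.
lemma pv_key (b1 b2 b3 b4 b5 b6 b7 b8 b9 b10 : Bool) :
    (if b1 || (b2 || (b3 || (b4 || (b5 || b6)))) then "advanced"
     else if b7 || (b8 || (b9 || b10)) then "high" else "moderate")
    = ((PySem.List.pyGet? (["moderate", "high", "advanced"] : List String)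
        (([(b1, (2 : Int)), (b2, 2), (b3, 2), (b4, 2), (b5, 2), (b6, 2),
           (b7, 1), (b8, 1), (b9, 1), (b10, 1)] : List (Bool × Int)).foldl
          (fun level p => if p.1 && p.2 > level then p.2 else level) 0)).getD "") := by
  revert b1 b2 b3 b4 b5 b6 b7 b8 b9 b10
  decide

-- ===== VERDICT (by name: the statement is the Claim_ definition above) =====
set_option maxHeartbeats 1000000 in
theorem assess_technology_level_py_spec : Claim_equal_assess_technology_level_py := by
  intro s _
  unfold Spec_assess_technology_level_py assess_technology_level_py assess_technology_level_py_alt pvScores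
  simp only [List.any_cons, List.any_nil, Bool.or_false]
  have hfold :
      (([( "ai", (2:Int)), ("quantum", 2), ("nano", 2), ("biotech", 2),
         ("semiconductor", 2), ("aerospace", 2),
         ("tech", 1), ("digital", 1), ("software", 1), ("renewable", 1)] : List (String × Int)).foldl
        (fun level kv => if PySem.Str.isIn kv.1 s && kv.2 > level then kv.2 else level) 0)
      = (([(PySem.Str.isIn "ai" s, (2:Int)), (PySem.Str.isIn "quantum" s, 2),
          (PySem.Str.isIn "nano" s, 2), (PySem.Str.isIn "biotech" s, 2),
          (PySem.Str.isIn "semiconductor" s, 2), (PySem.Str.isIn "aerospace" s, 2),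
          (PySem.Str.isIn "tech" s, 1), (PySem.Str.isIn "digital" s, 1),
          (PySem.Str.isIn "software" s, 1), (PySem.Str.isIn "renewable" s, 1)] : List (Bool × Int)).foldl
          (fun level p => if p.1 && p.2 > level then p.2 else level) 0) := by
    rw [show ([(PySem.Str.isIn "ai" s, (2:Int)), (PySem.Str.isIn "quantum" s, 2),
          (PySem.Str.isIn "nano" s, 2), (PySem.Str.isIn "biotech" s, 2),
          (PySem.Str.isIn "semiconductor" s, 2), (PySem.Str.isIn "aerospace" s, 2),
          (PySem.Str.isIn "tech" s, 1), (PySem.Str.isIn "digital" s, 1),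
          (PySem.Str.isIn "software" s, 1), (PySem.Str.isIn "renewable" s, 1)] : List (Bool × Int))
        = (([( "ai", (2:Int)), ("quantum", 2), ("nano", 2), ("biotech", 2),
            ("semiconductor", 2), ("aerospace", 2),
            ("tech", 1), ("digital", 1), ("software", 1), ("renewable", 1)] : List (String × Int)).map
            (fun kv => (PySem.Str.isIn kv.1 s, kv.2))) from rfl,
        List.foldl_map]
  rw [hfold]
  exact pv_key (PySem.Str.isIn "ai" s) (PySem.Str.isIn "quantum" s) (PySem.Str.isIn "nano" s)
    (PySem.Str.isIn "biotech" s) (PySem.Str.isIn "semiconductor" s) (PySem.Str.isIn "aerospace" s)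
    (PySem.Str.isIn "tech" s) (PySem.Str.isIn "digital" s) (PySem.Str.isIn "software" s)
    (PySem.Str.isIn "renewable" s)
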